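-- pv_equiv track=rewrite | github.com/domdal/S-Edge_PianoSSM | test_sc_add_params_macs_to_test.py | sweep
-- ===== SOURCE A (Python) =====
-- def sweep(current_scale, remaining_depth, upper_bound=16):
--     if remaining_depth == 0:
--         return [[]]
--     results = []
--     for i in range(1, upper_bound+1):
--         if current_scale*i>upper_bound+1:
--             break
--         results += [[current_scale*i,*ans] for ans in  sweep(current_scale*i, remaining_depth - 1, upper_bound=upper_bound)]
--     return results
-- ===== SOURCE B (Python) =====
-- def sweep(current_scale, remaining_depth, upper_bound=16):
--     # Iterative level-by-level build: a worklist of (prefix, last-value) states.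
--     states = [([], current_scale)]
--     for _ in range(remaining_depth):
--         nxt = []
--         for prefix, last in states:
--             for i in range(1, upper_bound + 1):
--                 v = last * i
--                 if v > upper_bound + 1:
--                     break
--                 nxt.append((prefix + [v], v))
--         states = nxt
--         if not states:
--             break
--     return [prefix for prefix, _ in states]
-- ===== Notes on version B (the rewrite author's own statement) =====
-- stated objective: alternative
-- what changed: Replaces A's DFS recursion with an iterative level-by-level worklist of (prefix, last-value) states, expanded remaining_depth times; in-order expansion reproduces A's output order exactly.
-- outside the precondition, e.g. on sweep(20, -1, 16): A returns [], B returns [[]]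
import Mathlib
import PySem

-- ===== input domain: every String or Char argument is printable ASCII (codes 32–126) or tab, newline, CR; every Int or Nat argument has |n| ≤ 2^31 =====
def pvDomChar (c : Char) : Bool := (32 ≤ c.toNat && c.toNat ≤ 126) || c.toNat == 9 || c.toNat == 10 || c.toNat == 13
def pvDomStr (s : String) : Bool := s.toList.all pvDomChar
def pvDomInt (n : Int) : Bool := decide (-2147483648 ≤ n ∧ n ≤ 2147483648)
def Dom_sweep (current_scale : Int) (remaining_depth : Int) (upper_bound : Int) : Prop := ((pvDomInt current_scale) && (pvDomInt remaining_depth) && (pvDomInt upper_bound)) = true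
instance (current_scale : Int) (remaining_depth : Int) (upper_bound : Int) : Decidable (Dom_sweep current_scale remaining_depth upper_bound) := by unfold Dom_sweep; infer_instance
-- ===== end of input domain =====

-- B replaces A's DFS recursion with an iterative level-by-level worklist build (same output, same order).


-- ===== PORT A =====
-- A's recursion on remaining_depth, realized on remaining_depth.toNat (exact for remaining_depth ≥ 0,
-- which Pre_sweep demands; on negative depth Python A recurses forever or returns [], excluded by Pre_).
-- The 'for i in range(1, upper_bound+1): … break …' loop is the counter recursion sweepLoopA: i starts
-- at 1, fuel = the range's iteration count, and the break stops the recursion (exact; range is lazy).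
mutual
def sweepA (cs : Int) (d : Nat) (ub : Int) : List (List Int) :=
  match d with
  | 0 => [[]]
  | Nat.succ d' => sweepLoopA cs ub d' 1 ub.toNat []
termination_by (d, 0)

def sweepLoopA (cs ub : Int) (d' : Nat) (i : Int) (fuel : Nat) (acc : List (List Int)) : List (List Int) :=
  match fuel with
  | 0 => acc
  | Nat.succ f =>
    if cs * i > ub + 1 then acc
    else sweepLoopA cs ub d' (i + 1) f (acc ++ (sweepA (cs * i) d' ub).map (fun ans => cs * i :: ans))
termination_by (d', fuel)
end

def sweep (current_scale : Int) (remaining_depth : Int) (upper_bound : Int) : List (List Int) :=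
  sweepA current_scale remaining_depth.toNat upper_bound

-- ===== PORT B =====
-- inner 'for i in range(1, upper_bound+1): … break …' loop producing one state's children
-- (same counter recursion for the lazy range with break)
def sweepB_childLoop (ub : Int) (p : List Int) (last : Int) (i : Int) (fuel : Nat)
    (acc : List (List Int × Int)) : List (List Int × Int) :=
  match fuel with
  | 0 => acc
  | Nat.succ f =>
    let v := last * i
    if v > ub + 1 then acc
    else sweepB_childLoop ub p last (i + 1) f (acc ++ [(p ++ [v], v)])

def sweepB_children (ub : Int) (p : List Int) (last : Int) : List (List Int × Int) :=
  sweepB_childLoop ub p last 1 ub.toNat []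

-- one pass over the worklist: 'for prefix, last in states: …'
def sweepB_step (ub : Int) (states : List (List Int × Int)) : List (List Int × Int) :=
  states.foldl (fun nxt s => nxt ++ sweepB_children ub s.1 s.2) []

-- 'for _ in range(remaining_depth): … if not states: break' as counter recursion on the lazy
-- range's iteration count (= remaining_depth.toNat), stopping at the break
def sweepB_outer (ub : Int) (fuel : Nat) (states : List (List Int × Int)) : List (List Int × Int) :=
  match fuel with
  | 0 => states
  | Nat.succ f =>
    let nxt := sweepB_step ub states
    if nxt = [] then nxt else sweepB_outer ub f nxt

def sweep_alt (current_scale : Int) (remaining_depth : Int) (upper_bound : Int) : List (List Int) :=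
  (sweepB_outer upper_bound remaining_depth.toNat [(([] : List Int), current_scale)]).map (·.1)

-- ===== PRECONDITION & SPEC =====
-- Pre_ excludes (a) negative remaining_depth, outside the natural domain, where Python A recurses
-- forever (RecursionError) or, when the loop breaks/never runs, accidentally returns [] while B's
-- range()-based loop returns [[]]; and (b) remaining_depth ≥ 1000 when a recursion chain exists
-- (upper_bound ≥ 1 and current_scale ≤ upper_bound+1), exactly the region where CPython's default
-- recursion limit of 1000 makes A raise RecursionError before returning anything.
def Pre_sweep (current_scale : Int) (remaining_depth : Int) (upper_bound : Int) : Prop :=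
  0 ≤ remaining_depth ∧ (remaining_depth < 1000 ∨ upper_bound < 1 ∨ upper_bound + 1 < current_scale)
instance (current_scale : Int) (remaining_depth : Int) (upper_bound : Int) : Decidable (Pre_sweep current_scale remaining_depth upper_bound) := by unfold Pre_sweep; infer_instance

def pvWitness_sweep : Int × Int × Int := (2, 2, 16)

def Spec_sweep (current_scale : Int) (remaining_depth : Int) (upper_bound : Int) (out : List (List Int)) : Prop := out = sweep_alt current_scale remaining_depth upper_bound
instance (current_scale : Int) (remaining_depth : Int) (upper_bound : Int) (out : List (List Int)) : Decidable (Spec_sweep current_scale remaining_depth upper_bound out) := by unfold Spec_sweep; infer_instance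

-- ===== CLAIM (what is proved, stated in full; the proofs are below) =====
def Claim_equal_sweep : Prop := ∀ (current_scale : Int) (remaining_depth : Int) (upper_bound : Int), Dom_sweep current_scale remaining_depth upper_bound → Pre_sweep current_scale remaining_depth upper_bound → Spec_sweep current_scale remaining_depth upper_bound (sweep current_scale remaining_depth upper_bound)

-- ===== LEMMAS AND PROOFS =====

-- the children index list both break-loops traverse: the prefix of range(1, ub+1) before the break
def pvChild (ub last : Int) : List Int :=
  (PySem.List.pyRange 1 (ub + 1) 1).takeWhile (fun i => !decide (last * i > ub + 1))

theorem pv_range_shift (ub : Int) :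
    PySem.List.pyRange 1 (1 + max ub 0) 1 = PySem.List.pyRange 1 (ub + 1) 1 := by
  by_cases h : 0 ≤ ub
  · congr 1
    omega
  · rw [PySem.List.pyRange_one_eq_nil (by omega), PySem.List.pyRange_one_eq_nil (by omega)]

theorem pv_loopA (cs ub : Int) (d : Nat) :
    ∀ (fuel : Nat) (i : Int) (acc : List (List Int)),
      sweepLoopA cs ub d i fuel acc
        = acc ++ ((PySem.List.pyRange i (i + (fuel : Int)) 1).takeWhile
              (fun j => !decide (cs * j > ub + 1))).flatMap
            (fun j => (sweepA (cs * j) d ub).map (fun ans => cs * j :: ans)) := by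
  intro fuel
  induction fuel with
  | zero =>
    intro i acc
    rw [sweepLoopA, PySem.List.pyRange_one_eq_nil (by omega)]
    simp
  | succ f ih =>
    intro i acc
    rw [sweepLoopA, PySem.List.pyRange_one_cons (by omega), List.takeWhile_cons]
    by_cases h : cs * i > ub + 1
    · simp [h]
    · have he : i + ((f : Nat) + 1 : Int) = (i + 1) + (f : Int) := by omega
      simp only [h, decide_false, Bool.not_false, ih]
      push_cast
      rw [he]
      simp

theorem pv_sweepA_succ (cs : Int) (d : Nat) (ub : Int) :
    sweepA cs (d + 1) ub
      = (pvChild ub cs).flatMap (fun i => (sweepA (cs * i) d ub).map (fun ans => cs * i :: ans)) := by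
  rw [sweepA, pv_loopA, pvChild]
  simp
  rw [pv_range_shift]

theorem pv_loopB (ub : Int) (p : List Int) (last : Int) :
    ∀ (fuel : Nat) (i : Int) (acc : List (List Int × Int)),
      sweepB_childLoop ub p last i fuel acc
        = acc ++ ((PySem.List.pyRange i (i + (fuel : Int)) 1).takeWhile
              (fun j => !decide (last * j > ub + 1))).map
            (fun j => (p ++ [last * j], last * j)) := by
  intro fuel
  induction fuel with
  | zero =>
    intro i acc
    rw [sweepB_childLoop, PySem.List.pyRange_one_eq_nil (by omega)]
    simp
  | succ f ih =>
    intro i acc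
    rw [sweepB_childLoop, PySem.List.pyRange_one_cons (by omega), List.takeWhile_cons]
    by_cases h : last * i > ub + 1
    · simp [h]
    · have he : i + ((f : Nat) + 1 : Int) = (i + 1) + (f : Int) := by omega
      simp only [h, decide_false, Bool.not_false, ih]
      push_cast
      rw [he]
      simp

theorem pv_children_eq (ub : Int) (p : List Int) (last : Int) :
    sweepB_children ub p last = (pvChild ub last).map (fun i => (p ++ [last * i], last * i)) := by
  rw [sweepB_children, pv_loopB, pvChild]
  simp
  rw [pv_range_shift]

theorem pv_step_eq (ub : Int) (states : List (List Int × Int)) :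
    sweepB_step ub states = states.flatMap (fun s => sweepB_children ub s.1 s.2) := by
  unfold sweepB_step
  simpa using PySem.List.foldl_append_eq_flatMap (fun s : List Int × Int => sweepB_children ub s.1 s.2) states []

-- apply the step d times (left to right)
def pvIter (ub : Int) (d : Nat) (states : List (List Int × Int)) : List (List Int × Int) :=
  match d with
  | 0 => states
  | Nat.succ d' => pvIter ub d' (sweepB_step ub states)

theorem pv_step_nil (ub : Int) : sweepB_step ub [] = [] := rfl

theorem pv_iter_nil (ub : Int) (d : Nat) : pvIter ub d [] = [] := by
  induction d with
  | zero => rfl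
  | succ d' ih => simpa [pvIter, pv_step_nil] using ih

theorem pv_outer_iter (ub : Int) :
    ∀ (fuel : Nat) (states : List (List Int × Int)),
      sweepB_outer ub fuel states = pvIter ub fuel states := by
  intro fuel
  induction fuel with
  | zero => intro states; rfl
  | succ f ih =>
    intro states
    rw [sweepB_outer]
    show (if sweepB_step ub states = [] then sweepB_step ub states else sweepB_outer ub f (sweepB_step ub states)) = pvIter ub (f + 1) states
    by_cases h : sweepB_step ub states = []
    · rw [if_pos h]
      show _ = pvIter ub f (sweepB_step ub states)
      rw [h, pv_iter_nil]
    · rw [if_neg h, ih]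
      rfl

theorem pv_main (ub : Int) (d : Nat) (states : List (List Int × Int)) :
    (pvIter ub d states).map (·.1)
      = states.flatMap (fun s => (sweepA s.2 d ub).map (fun ans => s.1 ++ ans)) := by
  induction d generalizing states with
  | zero =>
    simp [pvIter, sweepA, List.map_eq_flatMap]
  | succ d' ih =>
    show (pvIter ub d' (sweepB_step ub states)).map (·.1) = _
    rw [ih, pv_step_eq, List.flatMap_assoc]
    refine List.flatMap_congr ?_
    intro s _
    rw [pv_children_eq, List.flatMap_map, pv_sweepA_succ, List.map_flatMap]
    refine List.flatMap_congr ?_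
    intro i _
    simp [Function.comp_def]

theorem sweep_eq_alt (cs rd ub : Int) : sweep cs rd ub = sweep_alt cs rd ub := by
  unfold sweep sweep_alt
  rw [pv_outer_iter, pv_main]
  simp

-- ===== VERDICT (by name: the statement is the Claim_ definition above) =====
theorem sweep_spec : Claim_equal_sweep := by
  intro cs rd ub _ _
  exact sweep_eq_alt cs rd ub
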